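-- pv_equiv track=rewrite | github.com/0JMT0/Parasitic-Aware_Common-Centroid_routing | CP-seq_GA.py | build_cp_pairs
-- ===== SOURCE A (Python) =====
-- from typing import Dict, List, NamedTuple, Sequence, Set, Tuple
--
-- class AdjacentPair(NamedTuple):
--     index: int
--     orientation: str  # 'H' or 'V'
--     a: Tuple[int, int]
--     b: Tuple[int, int]
--
-- def _mirror(coord: Tuple[int, int], rows: int, cols: int) -> Tuple[int, int]:
--     r, c = coord
--     return rows - 1 - r, cols - 1 - c
--
-- def build_cp_pairs(rows: int, cols: int) -> List[AdjacentPair]: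
--     if rows <= 0 or cols <= 0:
--         raise ValueError("Array dimensions must be positive.")
--     pairs: List[AdjacentPair] = []
--     seen: Set[Tuple[Tuple[int, int], Tuple[int, int]]] = set()
--
--     def try_add(a: Tuple[int, int], b: Tuple[int, int], orientation: str) -> None:
--         canonical = tuple(sorted((a, b)))
--         mirror_pair = tuple(sorted((_mirror(a, rows, cols), _mirror(b, rows, cols))))
--         if canonical in seen or mirror_pair in seen:
--             return
--         seen.add(canonical)
--         seen.add(mirror_pair)
--         pairs.append(AdjacentPair(len(pairs), orientation, a, b))
--
--     for r in range(rows):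
--         for c in range(cols - 1):
--             try_add((r, c), (r, c + 1), "H")
--     for c in range(cols):
--         for r in range(rows - 1):
--             try_add((r, c), (r + 1, c), "V")
--     return pairs
-- ===== SOURCE B (Python) =====
-- from typing import List, NamedTuple, Tuple
--
-- class AdjacentPair(NamedTuple):
--     index: int
--     orientation: str  # 'H' or 'V'
--     a: Tuple[int, int]
--     b: Tuple[int, int]
--
-- def build_cp_pairs(rows: int, cols: int) -> List[AdjacentPair]:
--     if rows <= 0 or cols <= 0:
--         raise ValueError("Array dimensions must be positive.")
--     pairs: List[AdjacentPair] = []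
--     # keep a pair iff its start coordinate is no later (in scan order) than its mirror's start
--     for r in range(rows):
--         for c in range(cols - 1):
--             if (r, c) <= (rows - 1 - r, cols - 2 - c):
--                 pairs.append(AdjacentPair(len(pairs), "H", (r, c), (r, c + 1)))
--     for c in range(cols):
--         for r in range(rows - 1):
--             if (c, r) <= (cols - 1 - c, rows - 2 - r):
--                 pairs.append(AdjacentPair(len(pairs), "V", (r, c), (r + 1, c)))
--     return pairs
-- ===== Notes on version B (the rewrite author's own statement) =====
-- stated objective: simpler
-- what changed: B drops A's mutable `seen` dedup set (and its sorted-canonical/mirror key bookkeeping) entirely and decides inclusion of each candidate pair by a closed-form lexicographic comparison of its start coordinate with its mirror partner's start coordinate, appending with contiguous indices in the same scan order.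
import Mathlib
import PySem

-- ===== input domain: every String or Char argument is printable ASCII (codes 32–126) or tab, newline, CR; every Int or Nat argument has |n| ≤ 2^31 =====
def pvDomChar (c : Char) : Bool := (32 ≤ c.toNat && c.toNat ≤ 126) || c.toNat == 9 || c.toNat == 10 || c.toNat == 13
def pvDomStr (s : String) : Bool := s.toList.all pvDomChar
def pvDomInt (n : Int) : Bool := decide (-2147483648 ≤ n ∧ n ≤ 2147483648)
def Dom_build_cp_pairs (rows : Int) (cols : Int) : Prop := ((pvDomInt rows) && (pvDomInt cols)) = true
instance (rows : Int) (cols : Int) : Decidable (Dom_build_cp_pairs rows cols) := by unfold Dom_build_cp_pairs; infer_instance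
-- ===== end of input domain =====

-- B replaces A's mutable dedup `seen` set by a closed-form mirror-comparison test (simpler, no auxiliary state).

-- ===== PORT A =====
-- _mirror(coord, rows, cols)
def pvMirror (rows cols : Int) (coord : Int × Int) : Int × Int :=
  (rows - 1 - coord.1, cols - 1 - coord.2)

-- tuple(sorted((a, b))) on pairs of int pairs (Python tuple lexicographic order)
def pvSorted2 (a b : Int × Int) : (Int × Int) × (Int × Int) :=
  if a.1 < b.1 ∨ (a.1 = b.1 ∧ a.2 ≤ b.2) then (a, b) else (b, a)

-- state: (pairs, seen)
abbrev PvSt := List (Int × String × (Int × Int) × (Int × Int)) × PySem.Set ((Int × Int) × (Int × Int))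

-- the inner function try_add
def pvTryAdd (rows cols : Int) (st : PvSt) (a b : Int × Int) (o : String) : PvSt :=
  let canonical := pvSorted2 a b
  let mirror_pair := pvSorted2 (pvMirror rows cols a) (pvMirror rows cols b)
  if canonical ∈ st.2 ∨ mirror_pair ∈ st.2 then st
  else (st.1 ++ [((st.1.length : Int), o, a, b)],
        PySem.Set.add (PySem.Set.add st.2 canonical) mirror_pair)

def build_cp_pairs (rows : Int) (cols : Int) : List (Int × String × (Int × Int) × (Int × Int)) :=
  if rows ≤ 0 ∨ cols ≤ 0 then []  -- Python raises ValueError here; excluded by Pre_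
  else
    let st0 : PvSt := ([], PySem.Set.empty)
    let st1 := (PySem.List.pyRange 0 rows 1).foldl (fun st r =>
        (PySem.List.pyRange 0 (cols - 1) 1).foldl (fun st c =>
          pvTryAdd rows cols st (r, c) (r, c + 1) "H") st) st0
    let st2 := (PySem.List.pyRange 0 cols 1).foldl (fun st c =>
        (PySem.List.pyRange 0 (rows - 1) 1).foldl (fun st r =>
          pvTryAdd rows cols st (r, c) (r + 1, c) "V") st) st1
    st2.1

-- ===== PORT B =====
def build_cp_pairs_alt (rows : Int) (cols : Int) : List (Int × String × (Int × Int) × (Int × Int)) :=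
  if rows ≤ 0 ∨ cols ≤ 0 then []  -- Python raises ValueError here; excluded by Pre_
  else
    let p1 := (PySem.List.pyRange 0 rows 1).foldl (fun acc r =>
        (PySem.List.pyRange 0 (cols - 1) 1).foldl (fun acc c =>
          if r < rows - 1 - r ∨ (r = rows - 1 - r ∧ c ≤ cols - 2 - c) then
            acc ++ [((acc.length : Int), "H", (r, c), (r, c + 1))]
          else acc) acc) []
    (PySem.List.pyRange 0 cols 1).foldl (fun acc c =>
        (PySem.List.pyRange 0 (rows - 1) 1).foldl (fun acc r =>
          if c < cols - 1 - c ∨ (c = cols - 1 - c ∧ r ≤ rows - 2 - r) then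
            acc ++ [((acc.length : Int), "V", (r, c), (r + 1, c))]
          else acc) acc) p1

-- ===== PRECONDITION & SPEC =====
-- Python A raises ValueError exactly when rows <= 0 or cols <= 0.
def Pre_build_cp_pairs (rows : Int) (cols : Int) : Prop := 0 < rows ∧ 0 < cols
instance (rows : Int) (cols : Int) : Decidable (Pre_build_cp_pairs rows cols) := by
  unfold Pre_build_cp_pairs; infer_instance

def pvWitness_build_cp_pairs : Int × Int := (3, 4)

def Spec_build_cp_pairs (rows : Int) (cols : Int) (out : List (Int × String × (Int × Int) × (Int × Int))) : Prop := out = build_cp_pairs_alt rows cols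
instance (rows : Int) (cols : Int) (out : List (Int × String × (Int × Int) × (Int × Int))) : Decidable (Spec_build_cp_pairs rows cols out) := by unfold Spec_build_cp_pairs; infer_instance

-- ===== CLAIM (what is proved, stated in full; the proofs are below) =====
def Claim_equal_build_cp_pairs : Prop := ∀ (rows : Int) (cols : Int), Dom_build_cp_pairs rows cols → Pre_build_cp_pairs rows cols → Spec_build_cp_pairs rows cols (build_cp_pairs rows cols)

-- ===== LEMMAS AND PROOFS =====

-- A cell-pair triple: (orientation, start coordinate, end coordinate)
abbrev PvT := String × (Int × Int) × (Int × Int)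

-- the key A stores in `seen` for a well-formed triple
def pvKey (t : PvT) : (Int × Int) × (Int × Int) := t.2

-- the mirrored triple of a well-formed triple
def pvM (rows cols : Int) (t : PvT) : PvT :=
  if t.1 = "H" then
    ("H", (rows - 1 - t.2.1.1, cols - 2 - t.2.1.2), (rows - 1 - t.2.1.1, cols - 1 - t.2.1.2))
  else
    ("V", (rows - 2 - t.2.1.1, cols - 1 - t.2.1.2), (rows - 1 - t.2.1.1, cols - 1 - t.2.1.2))

-- iteration-order rank of a triple (H block first, then within a block scan order)
def pvRank (t : PvT) : Int × Int × Int :=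
  if t.1 = "H" then (0, t.2.1.1, t.2.1.2) else (1, t.2.1.2, t.2.1.1)

-- strict lexicographic order on ranks
def pvRlt (a b : Int × Int × Int) : Prop :=
  a.1 < b.1 ∨ (a.1 = b.1 ∧ (a.2.1 < b.2.1 ∨ (a.2.1 = b.2.1 ∧ a.2.2 < b.2.2)))

-- B's inclusion predicate
def pvPred (rows cols : Int) (t : PvT) : Bool :=
  if t.1 = "H" then
    decide (t.2.1.1 < rows - 1 - t.2.1.1 ∨
      (t.2.1.1 = rows - 1 - t.2.1.1 ∧ t.2.1.2 ≤ cols - 2 - t.2.1.2))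
  else
    decide (t.2.1.2 < cols - 1 - t.2.1.2 ∨
      (t.2.1.2 = cols - 1 - t.2.1.2 ∧ t.2.1.1 ≤ rows - 2 - t.2.1.1))

-- well-formed triples (exactly the members of the iteration list)
def pvWf (rows cols : Int) (t : PvT) : Prop :=
  (t.1 = "H" ∧ 0 ≤ t.2.1.1 ∧ t.2.1.1 < rows ∧ 0 ≤ t.2.1.2 ∧ t.2.1.2 < cols - 1 ∧
     t.2.2 = (t.2.1.1, t.2.1.2 + 1)) ∨
  (t.1 = "V" ∧ 0 ≤ t.2.1.1 ∧ t.2.1.1 < rows - 1 ∧ 0 ≤ t.2.1.2 ∧ t.2.1.2 < cols ∧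
     t.2.2 = (t.2.1.1 + 1, t.2.1.2))

-- the iteration lists
def pvLH (rows cols : Int) : List PvT :=
  (PySem.List.pyRange 0 rows 1).flatMap (fun r =>
    (PySem.List.pyRange 0 (cols - 1) 1).map (fun c => (("H" : String), (r, c), (r, c + 1))))

def pvLV (rows cols : Int) : List PvT :=
  (PySem.List.pyRange 0 cols 1).flatMap (fun c =>
    (PySem.List.pyRange 0 (rows - 1) 1).map (fun r => (("V" : String), (r, c), (r + 1, c))))

def pvL (rows cols : Int) : List PvT := pvLH rows cols ++ pvLV rows cols

def pvStepA (rows cols : Int) (st : PvSt) (t : PvT) : PvSt :=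
  pvTryAdd rows cols st t.2.1 t.2.2 t.1

def pvStepB (rows cols : Int) (acc : List (Int × String × (Int × Int) × (Int × Int))) (t : PvT) :
    List (Int × String × (Int × Int) × (Int × Int)) :=
  if pvPred rows cols t then acc ++ [((acc.length : Int), t)] else acc

def pvSeen (rows cols : Int) (done : List PvT) : PySem.Set ((Int × Int) × (Int × Int)) :=
  done.foldl (fun s t =>
    if pvPred rows cols t then PySem.Set.add (PySem.Set.add s (pvKey t)) (pvKey (pvM rows cols t))
    else s) PySem.Set.empty

-- ---- membership / shape lemmas ----

lemma pv_mem_LH {rows cols : Int} {t : PvT} :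
    t ∈ pvLH rows cols ↔
      (t.1 = "H" ∧ 0 ≤ t.2.1.1 ∧ t.2.1.1 < rows ∧ 0 ≤ t.2.1.2 ∧ t.2.1.2 < cols - 1 ∧
        t.2.2 = (t.2.1.1, t.2.1.2 + 1)) := by
  simp only [pvLH, List.mem_flatMap, List.mem_map, PySem.List.mem_pyRange_one]
  constructor
  · rintro ⟨r, ⟨hr0, hr1⟩, c, ⟨hc0, hc1⟩, rfl⟩
    exact ⟨rfl, hr0, hr1, hc0, hc1, rfl⟩
  · rintro ⟨h1, h2, h3, h4, h5, h6⟩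
    obtain ⟨o, ⟨a1, a2⟩, b⟩ := t
    simp only at h1 h2 h3 h4 h5 h6
    exact ⟨a1, ⟨h2, h3⟩, a2, ⟨h4, h5⟩, by simp [h1, h6]⟩

lemma pv_mem_LV {rows cols : Int} {t : PvT} :
    t ∈ pvLV rows cols ↔
      (t.1 = "V" ∧ 0 ≤ t.2.1.1 ∧ t.2.1.1 < rows - 1 ∧ 0 ≤ t.2.1.2 ∧ t.2.1.2 < cols ∧
        t.2.2 = (t.2.1.1 + 1, t.2.1.2)) := by
  simp only [pvLV, List.mem_flatMap, List.mem_map, PySem.List.mem_pyRange_one]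
  constructor
  · rintro ⟨c, ⟨hc0, hc1⟩, r, ⟨hr0, hr1⟩, rfl⟩
    exact ⟨rfl, hr0, hr1, hc0, hc1, rfl⟩
  · rintro ⟨h1, h2, h3, h4, h5, h6⟩
    obtain ⟨o, ⟨a1, a2⟩, b⟩ := t
    simp only at h1 h2 h3 h4 h5 h6
    exact ⟨a2, ⟨h4, h5⟩, a1, ⟨h2, h3⟩, by simp [h1, h6]⟩

lemma pv_mem_L {rows cols : Int} {t : PvT} :
    t ∈ pvL rows cols ↔ pvWf rows cols t := by
  simp only [pvL, List.mem_append, pv_mem_LH, pv_mem_LV, pvWf]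

-- ---- arithmetic facts about well-formed triples ----

lemma pv_wf_M {rows cols : Int} {t : PvT} (h : pvWf rows cols t) :
    pvWf rows cols (pvM rows cols t) := by
  obtain ⟨o, ⟨a1, a2⟩, b⟩ := t
  rcases h with ⟨h1, h2, h3, h4, h5, h6⟩ | ⟨h1, h2, h3, h4, h5, h6⟩ <;>
    simp only at h1 h2 h3 h4 h5 h6 <;> subst h1 <;> subst h6 <;>
    simp [pvM, pvWf, Prod.ext_iff] <;> omega

lemma pv_M_M {rows cols : Int} {t : PvT} (h : pvWf rows cols t) :
    pvM rows cols (pvM rows cols t) = t := by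
  obtain ⟨o, ⟨a1, a2⟩, b⟩ := t
  rcases h with ⟨h1, h2, h3, h4, h5, h6⟩ | ⟨h1, h2, h3, h4, h5, h6⟩ <;>
    simp only at h1 h2 h3 h4 h5 h6 <;> subst h1 <;> subst h6 <;>
    simp [pvM, Prod.ext_iff] <;> omega

lemma pv_key_inj {rows cols : Int} {t u : PvT} (ht : pvWf rows cols t) (hu : pvWf rows cols u)
    (h : pvKey t = pvKey u) : t = u := by
  obtain ⟨ot, ⟨t1, t2⟩, tb⟩ := t
  obtain ⟨ou, ⟨u1, u2⟩, ub⟩ := u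
  rcases ht with ⟨h1, _, _, _, _, h6⟩ | ⟨h1, _, _, _, _, h6⟩ <;>
    rcases hu with ⟨g1, _, _, _, _, g6⟩ | ⟨g1, _, _, _, _, g6⟩ <;>
      simp only at h1 h6 g1 g6 <;> subst h1 <;> subst g1 <;> subst h6 <;> subst g6 <;>
        simp only [pvKey, Prod.mk.injEq] at h <;> simp_all <;> omega

lemma pv_sorted_key {rows cols : Int} {t : PvT} (h : pvWf rows cols t) :
    pvSorted2 t.2.1 t.2.2 = pvKey t := by
  obtain ⟨o, ⟨a1, a2⟩, b⟩ := t
  rcases h with ⟨h1, h2, h3, h4, h5, h6⟩ | ⟨h1, h2, h3, h4, h5, h6⟩ <;>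
    simp only at h1 h2 h3 h4 h5 h6 <;> subst h1 <;> subst h6 <;>
    simp only [pvSorted2, pvKey] <;> split
  · rfl
  · rename_i hc
    exact absurd (by first | exact Or.inl (by omega) | exact Or.inr ⟨by trivial, by omega⟩
                           | exact Or.inr ⟨by omega, by omega⟩) hc
  · rfl
  · rename_i hc
    exact absurd (by first | exact Or.inl (by omega) | exact Or.inr ⟨by trivial, by omega⟩
                           | exact Or.inr ⟨by omega, by omega⟩) hc

lemma pv_sorted_mirror {rows cols : Int} {t : PvT} (h : pvWf rows cols t) :
    pvSorted2 (pvMirror rows cols t.2.1) (pvMirror rows cols t.2.2) = pvKey (pvM rows cols t) := by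
  obtain ⟨o, ⟨a1, a2⟩, b⟩ := t
  rcases h with ⟨h1, h2, h3, h4, h5, h6⟩ | ⟨h1, h2, h3, h4, h5, h6⟩ <;>
    simp only at h1 h2 h3 h4 h5 h6 <;> subst h1 <;> subst h6 <;>
    simp only [pvSorted2, pvMirror, pvKey, pvM, reduceIte] <;> split
  · rename_i hc; rcases hc with hc | ⟨hc1, hc2⟩ <;> exfalso <;> omega
  · refine Prod.ext ?_ ?_ <;> refine Prod.ext ?_ ?_ <;> simp <;> omega
  · rename_i hc; rcases hc with hc | ⟨hc1, hc2⟩ <;> exfalso <;> omega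
  · refine Prod.ext ?_ ?_ <;> refine Prod.ext ?_ ?_ <;> simp <;> omega

lemma pv_pred_iff_rank {rows cols : Int} {t : PvT} (h : pvWf rows cols t) :
    pvPred rows cols t ↔ ¬ pvRlt (pvRank (pvM rows cols t)) (pvRank t) := by
  obtain ⟨o, ⟨a1, a2⟩, b⟩ := t
  rcases h with ⟨h1, h2, h3, h4, h5, h6⟩ | ⟨h1, h2, h3, h4, h5, h6⟩ <;>
    simp only at h1 h2 h3 h4 h5 h6 <;> subst h1 <;> subst h6 <;>
    simp [pvPred, pvRank, pvRlt, pvM] <;> omega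

lemma pv_rlt_asymm {a b : Int × Int × Int} (h : pvRlt a b) : ¬ pvRlt b a := by
  simp only [pvRlt] at *; omega

lemma pv_rlt_irrefl (a : Int × Int × Int) : ¬ pvRlt a a := by
  simp only [pvRlt]; omega

-- ---- order of the iteration list ----

lemma pv_pairwise_L (rows cols : Int) :
    (pvL rows cols).Pairwise (fun t u => pvRlt (pvRank t) (pvRank u)) := by
  have hH : (pvLH rows cols).Pairwise (fun t u => pvRlt (pvRank t) (pvRank u)) := by
    rw [pvLH, List.pairwise_flatMap]
    constructor
    · intro r _
      rw [List.pairwise_map]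
      exact (PySem.List.pairwise_lt_pyRange_one 0 (cols-1)).imp
        (by intro a b hab; simp [pvRank, pvRlt]; omega)
    · refine (PySem.List.pairwise_lt_pyRange_one 0 rows).imp ?_
      intro a b hab x hx y hy
      simp only [List.mem_map] at hx hy
      obtain ⟨c, _, rfl⟩ := hx; obtain ⟨c', _, rfl⟩ := hy
      simp [pvRank, pvRlt]; omega
  have hV : (pvLV rows cols).Pairwise (fun t u => pvRlt (pvRank t) (pvRank u)) := by
    rw [pvLV, List.pairwise_flatMap]
    constructor
    · intro c _
      rw [List.pairwise_map]
      exact (PySem.List.pairwise_lt_pyRange_one 0 (rows-1)).imp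
        (by intro a b hab; simp [pvRank, pvRlt]; omega)
    · refine (PySem.List.pairwise_lt_pyRange_one 0 cols).imp ?_
      intro a b hab x hx y hy
      simp only [List.mem_map] at hx hy
      obtain ⟨r, _, rfl⟩ := hx; obtain ⟨r', _, rfl⟩ := hy
      simp [pvRank, pvRlt]; omega
  rw [pvL, List.pairwise_append]
  refine ⟨hH, hV, ?_⟩
  intro a ha b hb
  have h1 := (pv_mem_LH.mp ha).1
  have h2 := (pv_mem_LV.mp hb).1
  simp [pvRank, h1, h2, pvRlt]

-- ---- seen-set characterisation ----

lemma pv_mem_foldl_seen (rows cols : Int) (l : List PvT)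
    (s : PySem.Set ((Int × Int) × (Int × Int))) (k : (Int × Int) × (Int × Int)) :
    k ∈ l.foldl (fun s t =>
      if pvPred rows cols t then PySem.Set.add (PySem.Set.add s (pvKey t)) (pvKey (pvM rows cols t))
      else s) s ↔
    k ∈ s ∨ ∃ t ∈ l, pvPred rows cols t ∧ (k = pvKey t ∨ k = pvKey (pvM rows cols t)) := by
  induction l generalizing s with
  | nil => simp
  | cons t l ih =>
    simp only [List.foldl_cons, ih]
    by_cases hp : pvPred rows cols t
    · simp only [if_pos hp, PySem.Set.mem_add]
      constructor
      · rintro (((h | h) | h) | ⟨u, hu, h⟩)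
        · exact Or.inl h
        · exact Or.inr ⟨t, List.mem_cons_self, hp, Or.inl h⟩
        · exact Or.inr ⟨t, List.mem_cons_self, hp, Or.inr h⟩
        · exact Or.inr ⟨u, List.mem_cons_of_mem _ hu, h⟩
      · rintro (h | ⟨u, hu, hpu, h⟩)
        · exact Or.inl (Or.inl (Or.inl h))
        · rcases List.mem_cons.mp hu with rfl | hu
          · rcases h with h | h
            · exact Or.inl (Or.inl (Or.inr h))
            · exact Or.inl (Or.inr h)
          · exact Or.inr ⟨u, hu, hpu, h⟩
    · simp only [if_neg hp]
      constructor
      · rintro (h | ⟨u, hu, hpu, h⟩)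
        · exact Or.inl h
        · exact Or.inr ⟨u, List.mem_cons_of_mem _ hu, hpu, h⟩
      · rintro (h | ⟨u, hu, hpu, h⟩)
        · exact Or.inl h
        · rcases List.mem_cons.mp hu with rfl | hu
          · exact absurd hpu hp
          · exact Or.inr ⟨u, hu, hpu, h⟩

lemma pv_mem_seen {rows cols : Int} {done : List PvT} {k : (Int × Int) × (Int × Int)} :
    k ∈ pvSeen rows cols done ↔
      ∃ t ∈ done, pvPred rows cols t ∧ (k = pvKey t ∨ k = pvKey (pvM rows cols t)) := by
  rw [pvSeen, pv_mem_foldl_seen]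
  simp [PySem.Set.empty]

-- ---- the crux: A's skip condition equals ¬ pred at each position ----

lemma pv_cond_iff {rows cols : Int} {done rest : List PvT} {t : PvT}
    (hL : pvL rows cols = done ++ t :: rest) :
    (pvKey t ∈ pvSeen rows cols done ∨ pvKey (pvM rows cols t) ∈ pvSeen rows cols done) ↔
      ¬ pvPred rows cols t := by
  have htL : t ∈ pvL rows cols := by rw [hL]; simp
  have hwt : pvWf rows cols t := pv_mem_L.mp htL
  have hwMt : pvWf rows cols (pvM rows cols t) := pv_wf_M hwt
  have hpw := pv_pairwise_L rows cols
  rw [hL, List.pairwise_append] at hpw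
  obtain ⟨_, hpw2, hpw3⟩ := hpw
  have hdone_lt : ∀ x ∈ done, pvRlt (pvRank x) (pvRank t) := fun x hx =>
    hpw3 x hx t List.mem_cons_self
  have ht_lt_rest : ∀ x ∈ rest, pvRlt (pvRank t) (pvRank x) :=
    fun x hx => (List.pairwise_cons.mp hpw2).1 x hx
  have hwf_done : ∀ x ∈ done, pvWf rows cols x := by
    intro x hx
    exact pv_mem_L.mp (by rw [hL]; exact List.mem_append_left _ hx)
  have ht_notin_done : t ∉ done := by
    intro hx; exact pv_rlt_irrefl _ (hdone_lt t hx)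
  constructor
  · -- condition fired ⇒ mirror was earlier ⇒ t is the later of the two
    intro hcond
    have hMt_done : pvM rows cols t ∈ done := by
      rcases hcond with h | h <;> rw [pv_mem_seen] at h <;> obtain ⟨d, hd, hpd, hk⟩ := h <;>
        have hwd := hwf_done d hd
      · rcases hk with hk | hk
        · have he := pv_key_inj hwt hwd hk
          subst he
          exact absurd hd ht_notin_done
        · have he : t = pvM rows cols d := pv_key_inj hwt (pv_wf_M hwd) hk
          have he2 : pvM rows cols t = d := by rw [he, pv_M_M hwd]
          rw [he2]; exact hd
      · rcases hk with hk | hk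
        · have he := pv_key_inj hwMt hwd hk
          rw [he]; exact hd
        · have he : pvM rows cols t = pvM rows cols d := pv_key_inj hwMt (pv_wf_M hwd) hk
          have htd : t = d := by
            have h2 := congrArg (pvM rows cols) he
            rwa [pv_M_M hwt, pv_M_M hwd] at h2
          subst htd
          exact absurd hd ht_notin_done
    have := hdone_lt _ hMt_done
    rw [pv_pred_iff_rank hwt]
    exact not_not_intro this
  · -- ¬ pred ⇒ the mirror is strictly earlier, was kept, and put t's mirror key in seen
    intro hnp
    have hrlt : pvRlt (pvRank (pvM rows cols t)) (pvRank t) := by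
      rw [pv_pred_iff_rank hwt] at hnp
      exact not_not.mp hnp
    have hMt_ne : pvM rows cols t ≠ t := by
      intro he; rw [he] at hrlt; exact pv_rlt_irrefl _ hrlt
    have hMtL : pvM rows cols t ∈ pvL rows cols := pv_mem_L.mpr hwMt
    have hMt_done : pvM rows cols t ∈ done := by
      rw [hL] at hMtL
      rcases List.mem_append.mp hMtL with h | h
      · exact h
      · rcases List.mem_cons.mp h with h | h
        · exact absurd h hMt_ne
        · exact absurd hrlt (pv_rlt_asymm (ht_lt_rest _ h))
    have hpMt : pvPred rows cols (pvM rows cols t) := by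
      rw [pv_pred_iff_rank hwMt, pv_M_M hwt]
      exact pv_rlt_asymm hrlt
    right
    rw [pv_mem_seen]
    exact ⟨pvM rows cols t, hMt_done, hpMt, Or.inl rfl⟩

-- ---- the main invariant induction ----

lemma pv_stepB_append (rows cols : Int) (done : List PvT) (t : PvT) :
    (done ++ [t]).foldl (pvStepB rows cols) [] =
      pvStepB rows cols (done.foldl (pvStepB rows cols) []) t := by
  rw [List.foldl_append]; rfl

lemma pv_main (rows cols : Int) :
    ∀ todo done, pvL rows cols = done ++ todo →
      todo.foldl (pvStepA rows cols)
        (done.foldl (pvStepB rows cols) [], pvSeen rows cols done) =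
      ((done ++ todo).foldl (pvStepB rows cols) [], pvSeen rows cols (done ++ todo)) := by
  intro todo
  induction todo with
  | nil => intro done h; simp
  | cons t rest ih =>
    intro done hL
    have hstep :
        pvStepA rows cols (done.foldl (pvStepB rows cols) [], pvSeen rows cols done) t =
          ((done ++ [t]).foldl (pvStepB rows cols) [], pvSeen rows cols (done ++ [t])) := by
      have htL : t ∈ pvL rows cols := by rw [hL]; simp
      have hwt : pvWf rows cols t := pv_mem_L.mp htL
      have hcond := pv_cond_iff hL
      have hsk := pv_sorted_key hwt
      have hsm := pv_sorted_mirror hwt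
      rw [pv_stepB_append]
      simp only [pvStepA, pvTryAdd, hsk, hsm, pvStepB]
      have hseen : pvSeen rows cols (done ++ [t]) =
          (if pvPred rows cols t then
            PySem.Set.add (PySem.Set.add (pvSeen rows cols done) (pvKey t))
              (pvKey (pvM rows cols t))
          else pvSeen rows cols done) := by
        rw [pvSeen, List.foldl_append]; rfl
      by_cases hp : pvPred rows cols t
      · rw [if_neg (by rw [hcond]; exact not_not_intro hp), if_pos hp, hseen, if_pos hp]
      · rw [if_pos (hcond.mpr hp), if_neg hp, hseen, if_neg hp]
    rw [List.foldl_cons, hstep, ih (done ++ [t]) (by rw [hL, List.append_assoc]; rfl)]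
    rw [List.append_assoc]
    rfl

-- ---- folding the concrete double loops into folds over pvL ----

lemma pv_A_as_fold (rows cols : Int) (hr : 0 < rows) (hc : 0 < cols) :
    build_cp_pairs rows cols =
      ((pvL rows cols).foldl (pvStepA rows cols) ([], PySem.Set.empty)).1 := by
  rw [build_cp_pairs, if_neg (by omega)]
  rw [pvL, List.foldl_append, pvLH, pvLV, List.foldl_flatMap, List.foldl_flatMap]
  simp only [List.foldl_map]
  rfl

lemma pv_B_as_fold (rows cols : Int) (hr : 0 < rows) (hc : 0 < cols) :
    build_cp_pairs_alt rows cols = (pvL rows cols).foldl (pvStepB rows cols) [] := by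
  rw [build_cp_pairs_alt, if_neg (by omega)]
  rw [pvL, List.foldl_append, pvLH, pvLV, List.foldl_flatMap, List.foldl_flatMap]
  simp only [List.foldl_map]
  congr 1
  · funext acc c
    congr 1
    funext acc' r
    simp [pvStepB, pvPred]
  · congr 1
    funext acc r
    congr 1
    funext acc' c
    simp [pvStepB, pvPred]

-- ===== VERDICT (by name: the statement is the Claim_ definition above) =====
theorem build_cp_pairs_spec : Claim_equal_build_cp_pairs := by
  intro rows cols _ hpre
  obtain ⟨hr, hc⟩ := hpre
  unfold Spec_build_cp_pairs
  rw [pv_A_as_fold rows cols hr hc, pv_B_as_fold rows cols hr hc]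
  have h := pv_main rows cols (pvL rows cols) [] (by simp)
  simp only [List.foldl_nil, List.nil_append] at h
  rw [show (pvSeen rows cols [] : PySem.Set ((Int × Int) × (Int × Int))) = PySem.Set.empty from rfl] at h
  rw [h]
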